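-- pv_equiv track=rewrite | github.com/kishoreUdatha/BharatBuild_AI | backend/app/modules/automation/uml_generator.py | _detect_infrastructure
-- ===== SOURCE A (Python) =====
-- from typing import Dict, List, Optional, Any
--
-- def _detect_infrastructure(project_data: Dict) -> str:
--     """Detect infrastructure from project data."""
--     features_str = ' '.join(str(f).lower() for f in project_data.get('features', []))
--
--     infra = []
--
--     # Containerization
--     if 'docker' in features_str:
--         infra.append('Docker')
--     if 'kubernetes' in features_str or 'k8s' in features_str:
--         infra.append('Kubernetes')
--
--     # Cloud providers
--     if 'aws' in features_str or 's3' in features_str or 'ec2' in features_str: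
--         infra.append('AWS')
--     elif 'gcp' in features_str or 'google cloud' in features_str:
--         infra.append('GCP')
--     elif 'azure' in features_str:
--         infra.append('Azure')
--     elif 'vercel' in features_str:
--         infra.append('Vercel')
--     elif 'heroku' in features_str:
--         infra.append('Heroku')
--
--     # CI/CD
--     if any(kw in features_str for kw in ['ci/cd', 'github actions', 'jenkins', 'gitlab ci']):
--         infra.append('CI/CD Pipeline')
--
--     if not infra:
--         infra = ['Cloud Hosting', 'CI/CD']
--
--     return ' | '.join(infra[:4])
-- ===== SOURCE B (Python) =====
-- def _decode(mask):
--     """Turn the keyword bitmask into the ordered label list."""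
--     labels = []
--     if mask & 1:
--         labels.append('Docker')
--     if mask & 2:
--         labels.append('Kubernetes')
--     cloud = (mask >> 2) & 31          # the five cloud-provider bits, AWS lowest
--     if cloud:
--         i = 0
--         while cloud & 1 == 0:         # index of the lowest set bit = highest-priority provider
--             cloud >>= 1
--             i += 1
--         labels.append(['AWS', 'GCP', 'Azure', 'Vercel', 'Heroku'][i])
--     if mask & 128:
--         labels.append('CI/CD Pipeline')
--     return labels
--
--
-- def _detect_infrastructure(project_data):
--     """Detect infrastructure from project data (bitmask accumulate + decode)."""
--     text = ' '.join(str(f).lower() for f in project_data.get('features', []))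
--
--     # one pass: fold every keyword hit into a single bitmask
--     BITS = [('docker', 0), ('kubernetes', 1), ('k8s', 1),
--             ('aws', 2), ('s3', 2), ('ec2', 2),
--             ('gcp', 3), ('google cloud', 3), ('azure', 4),
--             ('vercel', 5), ('heroku', 6),
--             ('ci/cd', 7), ('github actions', 7), ('jenkins', 7), ('gitlab ci', 7)]
--     mask = 0
--     for kw, bit in BITS:
--         if kw in text:
--             mask |= 1 << bit
--
--     labels = _decode(mask)
--     return ' | '.join(labels) if labels else 'Cloud Hosting | CI/CD'
-- ===== Notes on version B (the rewrite author's own statement) =====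
-- stated objective: alternative
-- what changed: Replaces the if/elif substring-check chain by a bitmask algorithm: one pass over a flat keyword-to-bit table ORs every hit into a single integer mask, then a decode stage turns the mask into labels, finding the winning cloud provider as the lowest set bit of the mask's cloud field via a shift loop.
import Mathlib
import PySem

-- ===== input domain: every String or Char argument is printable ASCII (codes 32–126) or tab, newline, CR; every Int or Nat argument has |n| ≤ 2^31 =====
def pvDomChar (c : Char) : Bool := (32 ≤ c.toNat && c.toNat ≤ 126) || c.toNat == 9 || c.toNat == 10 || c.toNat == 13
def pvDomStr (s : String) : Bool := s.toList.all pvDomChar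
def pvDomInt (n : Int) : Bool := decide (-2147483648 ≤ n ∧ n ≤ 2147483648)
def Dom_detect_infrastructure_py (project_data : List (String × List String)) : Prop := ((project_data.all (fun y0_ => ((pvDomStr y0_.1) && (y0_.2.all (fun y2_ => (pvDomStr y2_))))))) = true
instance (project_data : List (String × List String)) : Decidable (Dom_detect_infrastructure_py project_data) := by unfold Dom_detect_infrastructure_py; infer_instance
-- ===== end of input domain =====

-- B replaces the if/elif keyword chain by one pass folding all keyword hits into a single bitmask,
-- then decodes the mask (lowest-set-bit loop for the cloud group) into labels; same cost (objective: alternative).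

-- shared transliteration of: ' '.join(str(f).lower() for f in project_data.get('features', []))
-- (dict.get = first match in the association list)
def pvFeaturesStr (project_data : List (String × List String)) : String :=
  PySem.Str.join " "
    ((((project_data.find? (fun p => p.1 == "features")).map (·.2)).getD []).map PySem.Str.lower)

-- ===== PORT A =====
def detect_infrastructure_py (project_data : List (String × List String)) : String :=
  let features_str := pvFeaturesStr project_data
  let infra : List String := []
  let infra := if PySem.Str.isIn "docker" features_str then infra ++ ["Docker"] else infra
  let infra := if PySem.Str.isIn "kubernetes" features_str || PySem.Str.isIn "k8s" features_str then infra ++ ["Kubernetes"] else infra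
  let infra :=
    if PySem.Str.isIn "aws" features_str || PySem.Str.isIn "s3" features_str || PySem.Str.isIn "ec2" features_str then infra ++ ["AWS"]
    else if PySem.Str.isIn "gcp" features_str || PySem.Str.isIn "google cloud" features_str then infra ++ ["GCP"]
    else if PySem.Str.isIn "azure" features_str then infra ++ ["Azure"]
    else if PySem.Str.isIn "vercel" features_str then infra ++ ["Vercel"]
    else if PySem.Str.isIn "heroku" features_str then infra ++ ["Heroku"]
    else infra
  let infra := if (["ci/cd", "github actions", "jenkins", "gitlab ci"].any (fun kw => PySem.Str.isIn kw features_str)) then infra ++ ["CI/CD Pipeline"] else infra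
  let infra := if infra.isEmpty then ["Cloud Hosting", "CI/CD"] else infra
  PySem.Str.join " | " (PySem.List.slice infra none (some 4))

-- ===== PORT B =====
-- the keyword → bit table (Source B's BITS)
def pvBits : List (String × Nat) :=
  [("docker", 0), ("kubernetes", 1), ("k8s", 1),
   ("aws", 2), ("s3", 2), ("ec2", 2),
   ("gcp", 3), ("google cloud", 3), ("azure", 4),
   ("vercel", 5), ("heroku", 6),
   ("ci/cd", 7), ("github actions", 7), ("jenkins", 7), ("gitlab ci", 7)]

-- the accumulation loop: for kw, bit in BITS: if kw in text: mask |= 1 << bit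
def pvMask (text : String) : Nat :=
  pvBits.foldl (fun mask p => if PySem.Str.isIn p.1 text then mask ||| (1 <<< p.2) else mask) 0

-- the while loop 'while cloud & 1 == 0: cloud >>= 1; i += 1'; fuel 5 suffices since it is
-- only entered with 0 < cloud < 32 (at most 4 iterations)
def pvWhileLow : Nat → Nat → Nat → Nat
  | 0, _, i => i
  | fuel + 1, cloud, i => if cloud &&& 1 == 0 then pvWhileLow fuel (cloud >>> 1) (i + 1) else i

-- Source B's _decode(mask); the list index is always in range (i ≤ 4 since 0 < cloud < 32),
-- so the .getD "" default is never used (the Python never raises here)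
def pvDecode (mask : Nat) : List String :=
  let labels : List String := []
  let labels := if mask &&& 1 ≠ 0 then labels ++ ["Docker"] else labels
  let labels := if mask &&& 2 ≠ 0 then labels ++ ["Kubernetes"] else labels
  let cloud := (mask >>> 2) &&& 31
  let labels :=
    if cloud ≠ 0 then
      labels ++ [(PySem.List.pyGet? ["AWS", "GCP", "Azure", "Vercel", "Heroku"]
                   ((pvWhileLow 5 cloud 0 : Nat) : Int)).getD ""]
    else labels
  let labels := if mask &&& 128 ≠ 0 then labels ++ ["CI/CD Pipeline"] else labels
  labels

def detect_infrastructure_py_alt (project_data : List (String × List String)) : String :=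
  let text := pvFeaturesStr project_data
  let labels := pvDecode (pvMask text)
  if labels.isEmpty then "Cloud Hosting | CI/CD" else PySem.Str.join " | " labels

-- ===== PRECONDITION & SPEC =====
def Spec_detect_infrastructure_py (project_data : List (String × List String)) (out : String) : Prop := out = detect_infrastructure_py_alt project_data
instance (project_data : List (String × List String)) (out : String) : Decidable (Spec_detect_infrastructure_py project_data out) := by unfold Spec_detect_infrastructure_py; infer_instance

-- ===== CLAIM (what is proved, stated in full; the proofs are below) =====
def Claim_equal_detect_infrastructure_py : Prop := ∀ (project_data : List (String × List String)), Dom_detect_infrastructure_py project_data → Spec_detect_infrastructure_py project_data (detect_infrastructure_py project_data)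

-- ===== LEMMAS AND PROOFS =====
-- A's infra list (with fallback and slice) as a function of the 8 group booleans (rfl-equal to A's body)
def pvAList (b0 b1 b2 b3 b4 b5 b6 b7 : Bool) : List String :=
  let infra : List String := []
  let infra := if b0 then infra ++ ["Docker"] else infra
  let infra := if b1 then infra ++ ["Kubernetes"] else infra
  let infra :=
    if b2 then infra ++ ["AWS"]
    else if b3 then infra ++ ["GCP"]
    else if b4 then infra ++ ["Azure"]
    else if b5 then infra ++ ["Vercel"]
    else if b6 then infra ++ ["Heroku"]
    else infra
  let infra := if b7 then infra ++ ["CI/CD Pipeline"] else infra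
  let infra := if infra.isEmpty then ["Cloud Hosting", "CI/CD"] else infra
  PySem.List.slice infra none (some 4)

-- the bitmask as a function of the same 8 group booleans (right-nested, matching the fold)
def pvMaskOf (b0 b1 b2 b3 b4 b5 b6 b7 : Bool) : Nat :=
  (if b0 then 1 <<< 0 else 0) ||| ((if b1 then 1 <<< 1 else 0) ||| ((if b2 then 1 <<< 2 else 0) |||
  ((if b3 then 1 <<< 3 else 0) ||| ((if b4 then 1 <<< 4 else 0) ||| ((if b5 then 1 <<< 5 else 0) |||
  ((if b6 then 1 <<< 6 else 0) ||| (if b7 then 1 <<< 7 else 0)))))))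

-- the fold's step function (defeq to the lambda in pvMask)
def pvStep (s : String) (m : Nat) (p : String × Nat) : Nat :=
  if PySem.Str.isIn p.1 s then m ||| (1 <<< p.2) else m

lemma step_or (m v : Nat) (c : Bool) :
    (if c = true then m ||| v else m) = m ||| (if c = true then v else 0) := by
  cases c <;> simp

lemma foldl_step_or (s : String) (l : List (String × Nat)) (m : Nat) :
    l.foldl (pvStep s) m = m ||| l.foldl (pvStep s) 0 := by
  induction l generalizing m with
  | nil => simp [List.foldl]
  | cons p l ih =>
      rw [List.foldl_cons, List.foldl_cons, ih, ih (pvStep s 0 p)]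
      simp only [pvStep, step_or, Nat.zero_or, Nat.or_assoc]

lemma foldl_step_cons (s : String) (p : String × Nat) (l : List (String × Nat)) :
    (p :: l).foldl (pvStep s) 0 =
      (if PySem.Str.isIn p.1 s then 1 <<< p.2 else 0) ||| l.foldl (pvStep s) 0 := by
  rw [List.foldl_cons, foldl_step_or]
  simp only [pvStep, Nat.zero_or]

lemma merge_or (a b : Bool) (v r : Nat) :
    (if a = true then v else 0) ||| ((if b = true then v else 0) ||| r) =
      (if (a || b) = true then v else 0) ||| r := by
  cases a <;> cases b <;> simp [Nat.zero_or, ← Nat.or_assoc]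

lemma merge_or' (a b : Bool) (v : Nat) :
    (if a = true then v else 0) ||| (if b = true then v else 0) =
      (if (a || b) = true then v else 0) := by
  cases a <;> cases b <;> simp [Nat.or_self]

lemma pvMask_eq (s : String) :
    pvMask s =
      pvMaskOf (PySem.Str.isIn "docker" s)
        (PySem.Str.isIn "kubernetes" s || PySem.Str.isIn "k8s" s)
        (PySem.Str.isIn "aws" s || PySem.Str.isIn "s3" s || PySem.Str.isIn "ec2" s)
        (PySem.Str.isIn "gcp" s || PySem.Str.isIn "google cloud" s)
        (PySem.Str.isIn "azure" s) (PySem.Str.isIn "vercel" s) (PySem.Str.isIn "heroku" s)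
        (["ci/cd", "github actions", "jenkins", "gitlab ci"].any (fun kw => PySem.Str.isIn kw s)) := by
  have h : pvMask s = pvBits.foldl (pvStep s) 0 := rfl
  rw [h, pvBits]
  simp only [foldl_step_cons, List.foldl_nil, Nat.or_zero, merge_or, merge_or', pvMaskOf,
    List.any_cons, List.any_nil, Bool.or_false, Bool.or_assoc]

-- A's list equals B's decoded list, for every combination of the 8 group booleans
lemma pvList_eq (b0 b1 b2 b3 b4 b5 b6 b7 : Bool) :
    pvAList b0 b1 b2 b3 b4 b5 b6 b7 =
      (if (pvDecode (pvMaskOf b0 b1 b2 b3 b4 b5 b6 b7)).isEmpty then ["Cloud Hosting", "CI/CD"]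
       else pvDecode (pvMaskOf b0 b1 b2 b3 b4 b5 b6 b7)) := by
  cases b0 <;> cases b1 <;> cases b2 <;> cases b3 <;> cases b4 <;> cases b5 <;> cases b6 <;> cases b7 <;> rfl

lemma final_join (L : List String) :
    PySem.Str.join " | " (if L.isEmpty then ["Cloud Hosting", "CI/CD"] else L) =
      (if L.isEmpty then "Cloud Hosting | CI/CD" else PySem.Str.join " | " L) := by
  cases L <;> rfl

-- ===== VERDICT (by name: the statement is the Claim_ definition above) =====
theorem detect_infrastructure_py_spec : Claim_equal_detect_infrastructure_py := by
  intro pd _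
  show detect_infrastructure_py pd = detect_infrastructure_py_alt pd
  have hA : detect_infrastructure_py pd =
      PySem.Str.join " | "
        (pvAList (PySem.Str.isIn "docker" (pvFeaturesStr pd))
          (PySem.Str.isIn "kubernetes" (pvFeaturesStr pd) || PySem.Str.isIn "k8s" (pvFeaturesStr pd))
          (PySem.Str.isIn "aws" (pvFeaturesStr pd) || PySem.Str.isIn "s3" (pvFeaturesStr pd) || PySem.Str.isIn "ec2" (pvFeaturesStr pd))
          (PySem.Str.isIn "gcp" (pvFeaturesStr pd) || PySem.Str.isIn "google cloud" (pvFeaturesStr pd))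
          (PySem.Str.isIn "azure" (pvFeaturesStr pd)) (PySem.Str.isIn "vercel" (pvFeaturesStr pd))
          (PySem.Str.isIn "heroku" (pvFeaturesStr pd))
          (["ci/cd", "github actions", "jenkins", "gitlab ci"].any (fun kw => PySem.Str.isIn kw (pvFeaturesStr pd)))) := rfl
  have hB : detect_infrastructure_py_alt pd =
      (if (pvDecode (pvMask (pvFeaturesStr pd))).isEmpty then "Cloud Hosting | CI/CD"
       else PySem.Str.join " | " (pvDecode (pvMask (pvFeaturesStr pd)))) := rfl
  rw [hA, hB, pvMask_eq, pvList_eq, final_join]
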